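-- pv_equiv track=rewrite | github.com/AldoDevgado/Matematicas_Discretas | ProyectoGrafos/GrafosFinal.py | es_transitiva
-- ===== SOURCE A (Python) =====
-- def es_transitiva(matriz):
--     n = len(matriz)  # Número de nodos
--     for i in range(n):
--         for j in range(n):
--             if i != j and matriz[i][j]==1:
--                 for k in range(n):
--                     if k != j and matriz[j][k]==1:
--                         if matriz[i][k]==1:
--                             return True
--     return False
-- ===== SOURCE B (Python) =====
-- def es_transitiva(matriz):
--     n = len(matriz)
--     bits = [sum(1 << k for k in range(n) if row[k] == 1) for row in matriz]
--     for i in range(n):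
--         bi = bits[i]
--         for j in range(n):
--             if i != j and (bi >> j) & 1:
--                 common = bi & bits[j]
--                 if common != common & (1 << j):
--                     return True
--     return False
-- ===== Notes on version B (the rewrite author's own statement) =====
-- stated objective: alternative
-- what changed: B packs each row into an integer bitmask once and replaces A's innermost scan over k by word-level bit operations (AND of the two row masks plus a test that the intersection has a bit other than j), so the explicit k-loop disappears.
-- outside the precondition, e.g. on es_transitiva([[0, 1, 1], [0, 0, 1], []]): A returns True, B raises IndexError
import Mathlib
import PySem

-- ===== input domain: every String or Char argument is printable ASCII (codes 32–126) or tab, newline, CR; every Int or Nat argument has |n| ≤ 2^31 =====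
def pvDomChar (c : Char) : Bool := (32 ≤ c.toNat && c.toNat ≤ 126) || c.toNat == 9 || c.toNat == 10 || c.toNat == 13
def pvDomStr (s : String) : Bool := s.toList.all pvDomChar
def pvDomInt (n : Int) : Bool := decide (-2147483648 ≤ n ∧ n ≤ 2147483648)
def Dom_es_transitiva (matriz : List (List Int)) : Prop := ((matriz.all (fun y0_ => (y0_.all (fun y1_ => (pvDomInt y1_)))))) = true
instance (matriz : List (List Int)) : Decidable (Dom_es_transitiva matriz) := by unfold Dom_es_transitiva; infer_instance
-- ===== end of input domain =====

-- B replaces A's innermost k-scan by bitmask row intersections (a structurally different, word-parallel algorithm; not measured faster on random inputs).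

-- ===== PORT A =====
-- matriz[i][j] in A; `none` marks Python's IndexError (excluded by Pre_).
def pvCell (m : List (List Int)) (i j : Int) : Option Int :=
  (PySem.List.pyGet? m i).bind fun row => PySem.List.pyGet? row j

-- A's early `return True` from nested for-loops is the short-circuit `any` over the same ranges.
def es_transitiva (matriz : List (List Int)) : Bool :=
  let n : Int := matriz.length
  (PySem.List.pyRange 0 n 1).any fun i =>
    (PySem.List.pyRange 0 n 1).any fun j =>
      decide (i ≠ j) && (pvCell matriz i j == some 1) &&
        ((PySem.List.pyRange 0 n 1).any fun k =>
          decide (k ≠ j) && (pvCell matriz j k == some 1) && (pvCell matriz i k == some 1))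

-- ===== PORT B =====
-- bits-row: sum(1 << k for k in range(n) if row[k] == 1); indices k are 0..n-1, so Nat is exact.
-- `row.getD k 0` stands for row[k] (in range under Pre_; Python raises out of range).
def pvMask (row : List Int) (n : Nat) : Nat :=
  (List.range n).foldl (fun acc k => if row.getD k 0 == 1 then acc + (1 <<< k) else acc) 0

def es_transitiva_alt (matriz : List (List Int)) : Bool :=
  let n := matriz.length
  let bits := matriz.map (fun row => pvMask row n)
  (List.range n).any fun i =>
    let bi := bits.getD i 0
    (List.range n).any fun j =>
      decide (i ≠ j) && decide ((bi >>> j) &&& 1 ≠ 0) &&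
        (let common := bi &&& bits.getD j 0
         decide (common ≠ common &&& (1 <<< j)))

-- ===== PRECONDITION & SPEC =====
-- Pre_ excludes ragged matrices (a row shorter than len(matriz)): there Python A raises
-- IndexError, or returns True only because its scan order happens not to reach the short row.
def Pre_es_transitiva (matriz : List (List Int)) : Prop :=
  ∀ row ∈ matriz, matriz.length ≤ row.length
instance (matriz : List (List Int)) : Decidable (Pre_es_transitiva matriz) := by
  unfold Pre_es_transitiva; infer_instance

def pvWitness_es_transitiva : List (List Int) := [[0, 1, 0], [0, 0, 1], [1, 0, 0]]

def Spec_es_transitiva (matriz : List (List Int)) (out : Bool) : Prop := out = es_transitiva_alt matriz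
instance (matriz : List (List Int)) (out : Bool) : Decidable (Spec_es_transitiva matriz out) := by unfold Spec_es_transitiva; infer_instance

-- ===== CLAIM (what is proved, stated in full; the proofs are below) =====
def Claim_equal_es_transitiva : Prop := ∀ (matriz : List (List Int)), Dom_es_transitiva matriz → Pre_es_transitiva matriz → Spec_es_transitiva matriz (es_transitiva matriz)

-- ===== LEMMAS AND PROOFS =====

-- the shared characterisation: a "transitive witness" triple exists
def pvEx (m : List (List Int)) : Prop :=
  ∃ i j k : Nat, i < m.length ∧ j < m.length ∧ k < m.length ∧ i ≠ j ∧ k ≠ j ∧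
    (m[i]?.getD [])[j]?.getD 0 = 1 ∧ (m[j]?.getD [])[k]?.getD 0 = 1 ∧ (m[i]?.getD [])[k]?.getD 0 = 1

theorem pvCell_eq (m : List (List Int)) (h : Pre_es_transitiva m) (i j : Int)
    (h0i : 0 ≤ i) (hin : i < (m.length : Int)) (h0j : 0 ≤ j) (hjn : j < (m.length : Int)) :
    pvCell m i j = some ((m[i.toNat]?.getD [])[j.toNat]?.getD 0) := by
  have hin' : i.toNat < m.length := by omega
  have hrow : m.length ≤ m[i.toNat].length := h _ (List.getElem_mem hin')
  have hjn' : j.toNat < m[i.toNat].length := by omega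
  unfold pvCell
  rw [PySem.List.pyGet?_eq_some_getElem m h0i (by exact_mod_cast hin), Option.bind_some,
      PySem.List.pyGet?_eq_some_getElem _ h0j (by exact_mod_cast (by omega : j < (m[i.toNat].length : Int)))]
  simp [List.getElem?_eq_getElem hin', List.getElem?_eq_getElem hjn']

theorem a_iff (m : List (List Int)) (h : Pre_es_transitiva m) :
    es_transitiva m = true ↔ pvEx m := by
  simp only [es_transitiva, List.any_eq_true, PySem.List.mem_pyRange_one,
    Bool.and_eq_true, decide_eq_true_eq, beq_iff_eq, pvEx]
  constructor
  · rintro ⟨i, ⟨h0i, hin⟩, j, ⟨h0j, hjn⟩, ⟨hij, hc1⟩, k, ⟨h0k, hkn⟩, ⟨hkj, hc2⟩, hc3⟩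
    rw [pvCell_eq m h i j h0i hin h0j hjn] at hc1
    rw [pvCell_eq m h j k h0j hjn h0k hkn] at hc2
    rw [pvCell_eq m h i k h0i hin h0k hkn] at hc3
    exact ⟨i.toNat, j.toNat, k.toNat, by omega, by omega, by omega, by omega, by omega,
      Option.some.inj hc1, Option.some.inj hc2, Option.some.inj hc3⟩
  · rintro ⟨i, j, k, hin, hjn, hkn, hij, hkj, hc1, hc2, hc3⟩
    refine ⟨(i : Int), ⟨by omega, by omega⟩, (j : Int), ⟨by omega, by omega⟩,
      ⟨by omega, ?_⟩, (k : Int), ⟨by omega, by omega⟩, ⟨by omega, ?_⟩, ?_⟩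
    · rw [pvCell_eq m h i j (by omega) (by omega) (by omega) (by omega)]
      simp only [Int.toNat_natCast]
      exact congrArg some hc1
    · rw [pvCell_eq m h j k (by omega) (by omega) (by omega) (by omega)]
      simp only [Int.toNat_natCast]
      exact congrArg some hc2
    · rw [pvCell_eq m h i k (by omega) (by omega) (by omega) (by omega)]
      simp only [Int.toNat_natCast]
      exact congrArg some hc3

theorem pvMask_succ (row : List Int) (n : Nat) :
    pvMask row (n + 1) =
      if row.getD n 0 == 1 then pvMask row n + (1 <<< n) else pvMask row n := by
  simp [pvMask, List.range_succ]

theorem pvMask_lt (row : List Int) (n : Nat) : pvMask row n < 2 ^ n := by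
  induction n with
  | zero => simp [pvMask]
  | succ n ih =>
    rw [pvMask_succ, Nat.one_shiftLeft]
    have : 2 ^ (n + 1) = 2 ^ n + 2 ^ n := by ring
    split <;> omega

theorem pvMask_testBit (row : List Int) (n k : Nat) :
    (pvMask row n).testBit k = (decide (k < n) && decide (row[k]?.getD 0 = 1)) := by
  induction n with
  | zero => simp [pvMask]
  | succ n ih =>
    rw [pvMask_succ]
    have hcond : (row.getD n 0 == 1) = decide (row[n]?.getD 0 = 1) := by
      simp [List.getD_eq_getElem?_getD, Bool.beq_eq_decide_eq]
    rcases Nat.lt_trichotomy k n with hk | hk | hk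
    · have hdec : decide (k < n + 1) = decide (k < n) := by
        simp [hk, Nat.lt_succ_of_lt hk]
      by_cases hb : row[n]?.getD 0 = 1
      · rw [hcond, if_pos (by simpa using hb), Nat.one_shiftLeft, Nat.add_comm,
          Nat.testBit_two_pow_add_gt hk, ih, hdec]
      · rw [hcond, if_neg (by simpa using hb), ih, hdec]
    · subst hk
      by_cases hb : row[k]?.getD 0 = 1
      · rw [hcond, if_pos (by simpa using hb), Nat.one_shiftLeft, Nat.add_comm,
          Nat.testBit_two_pow_add_eq, ih]
        simp [hb]
      · rw [hcond, if_neg (by simpa using hb), ih]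
        simp [hb]
    · have hlt : ∀ a : Nat, a < 2 ^ (n + 1) → a.testBit k = false := by
        intro a ha
        apply Nat.testBit_lt_two_pow
        calc a < 2 ^ (n + 1) := ha
          _ ≤ 2 ^ k := Nat.pow_le_pow_right (by norm_num) hk
      have hmask := pvMask_lt row n
      have h2 : 2 ^ (n + 1) = 2 ^ n + 2 ^ n := by ring
      have hfalse : decide (k < n + 1) = false := by simp; omega
      rw [hfalse, Bool.false_and]
      split
      · exact hlt _ (by rw [Nat.one_shiftLeft]; omega)
      · exact hlt _ (by omega)

theorem pvBitOne (b j : Nat) : ((b >>> j) &&& 1 ≠ 0) ↔ b.testBit j = true := by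
  rw [Nat.and_one_is_mod, Nat.shiftRight_eq_div_pow, Nat.testBit_eq_decide_div_mod_eq]
  simp

theorem pvNeCommon (c j : Nat) :
    (c ≠ c &&& (1 <<< j)) ↔ ∃ k, k ≠ j ∧ c.testBit k = true := by
  rw [Nat.one_shiftLeft]
  constructor
  · intro hne
    by_contra hno
    push Not at hno
    apply hne
    apply Nat.eq_of_testBit_eq
    intro k
    rw [Nat.testBit_and, Nat.testBit_two_pow]
    by_cases hk : k = j
    · subst hk; simp
    · have hb := hno k hk
      simp only [Bool.not_eq_true] at hb
      simp [hb]
  · rintro ⟨k, hkj, hbit⟩ heq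
    have h2 := congrArg (Nat.testBit · k) heq
    simp only [Nat.testBit_and, Nat.testBit_two_pow] at h2
    rw [hbit] at h2
    simp at h2
    exact hkj h2.symm

theorem pvBits_getD (m : List (List Int)) (n i : Nat) (hi : i < m.length) :
    (m.map (fun row => pvMask row n)).getD i 0 = pvMask (m[i]?.getD []) n := by
  rw [List.getD_eq_getElem _ 0 (by simpa using hi), List.getElem_map,
    List.getElem?_eq_getElem hi]
  simp

theorem b_iff (m : List (List Int)) : es_transitiva_alt m = true ↔ pvEx m := by
  simp only [es_transitiva_alt, List.any_eq_true, List.mem_range,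
    Bool.and_eq_true, decide_eq_true_eq, pvEx]
  constructor
  · rintro ⟨i, hin, j, hjn, ⟨hij, hb1⟩, hb2⟩
    rw [pvBits_getD m m.length i hin] at hb1 hb2
    rw [pvBits_getD m m.length j hjn] at hb2
    rw [pvBitOne, pvMask_testBit] at hb1
    rw [pvNeCommon] at hb2
    obtain ⟨k, hkj, hbit⟩ := hb2
    rw [Nat.testBit_and, pvMask_testBit, pvMask_testBit] at hbit
    simp only [Bool.and_eq_true, decide_eq_true_eq] at hb1 hbit
    exact ⟨i, j, k, hin, hjn, hbit.1.1, hij, hkj, hb1.2, hbit.2.2, hbit.1.2⟩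
  · rintro ⟨i, j, k, hin, hjn, hkn, hij, hkj, hc1, hc2, hc3⟩
    refine ⟨i, hin, j, hjn, ⟨hij, ?_⟩, ?_⟩
    · rw [pvBits_getD m m.length i hin, pvBitOne, pvMask_testBit]
      simp [hjn, hc1]
    · rw [pvBits_getD m m.length i hin, pvBits_getD m m.length j hjn, pvNeCommon]
      refine ⟨k, hkj, ?_⟩
      rw [Nat.testBit_and, pvMask_testBit, pvMask_testBit]
      simp [hkn, hc2, hc3]

-- ===== VERDICT (by name: the statement is the Claim_ definition above) =====
theorem es_transitiva_spec : Claim_equal_es_transitiva := by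
  intro m _ hpre
  unfold Spec_es_transitiva
  rw [Bool.eq_iff_iff, a_iff m hpre, b_iff m]
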